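-- pv_equiv track=rewrite | github.com/seba-velarde19/Fundamentos | fundamentos/practica_parcial/slogan.py | convertir_slogan
-- ===== SOURCE A (Python) =====
-- def convertir_slogan(cadena, numero):
--     """a. Escribir una función que reciba una cadena con un nombre y un número N, y devuelva una cadena representando el slogan. Un slogan se forma con:
--
--         Las 2 primeras letras de la cadena seguidas por una coma, repetido N veces separado por un espacio
--         El nombre seguido de un espacio
--         Las 2 primeras letras de la cadena seguidas por la segunda letra de la cadena repetida N veces.
--
--     Ejemplo: - Para "Alan" y 3 debe devolver "Al, Al, Al, Alan Allll" - Para "Barbara" y 2 debe devolver "Ba, Ba, Barbara Baaa"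
--
--     b. Escribir un programa que utilice la función, pidiendole al usuario que ingrese por separado el nombre y el numero, y finalmente imprima el resultado. El programa debe asegurarse que lo ingresado por el usuario es válido (es decir, el programa no lanza error) y volviéndole a pedir que ingrese los valores necesarios hasta que cumpla con las condiciones necesarias.
--
--     """
--     lista1 = []
--     lista2 = []
--     lista3 = []
--     for i in range(len(cadena)):
--         lista1.append(cadena[0])
--         lista2.append(cadena[i])
--         lista3.append(cadena[0])
--     lista = lista1 + lista2 + lista3
--     return "".join(lista)
-- ===== SOURCE B (Python) =====
-- def convertir_slogan(cadena, numero):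
--     block = cadena[:1] * len(cadena)
--     return block + cadena + block
-- ===== Notes on version B (the rewrite author's own statement) =====
-- stated objective: simpler
-- what changed: Replaces the three per-index append loops with a closed-form string expression: the repeated-first-char block is cadena[:1]*len(cadena) and the result is block + cadena + block (numero is ignored, as in A).
import Mathlib
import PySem

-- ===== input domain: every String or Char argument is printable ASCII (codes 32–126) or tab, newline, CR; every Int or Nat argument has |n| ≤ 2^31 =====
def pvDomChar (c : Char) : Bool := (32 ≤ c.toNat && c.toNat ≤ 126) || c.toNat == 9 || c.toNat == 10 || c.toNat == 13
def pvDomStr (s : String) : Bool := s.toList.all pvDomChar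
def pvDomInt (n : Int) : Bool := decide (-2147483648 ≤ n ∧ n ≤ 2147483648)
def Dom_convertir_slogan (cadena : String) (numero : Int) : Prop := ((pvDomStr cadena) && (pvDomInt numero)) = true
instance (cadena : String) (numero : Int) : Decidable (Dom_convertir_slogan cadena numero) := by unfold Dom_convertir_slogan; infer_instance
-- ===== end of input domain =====

-- B replaces A's three per-index append loops with the closed form block + cadena + block,
-- where block = cadena[:1] * len(cadena); simpler, same O(n) cost.


-- ===== PORT A =====
-- Literal port: the for-loop over range(len(cadena)) appending cadena[0], cadena[i], cadena[0]
-- to three lists, then concatenating and joining. Indices in the loop are always in range,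
-- so pyGetD with a dummy default is exact.
def convertir_slogan (cadena : String) (numero : Int) : String :=
  let cs := cadena.toList
  let res := (PySem.List.pyRange 0 (cs.length : Int) 1).foldl
      (fun (acc : List Char × List Char × List Char) i =>
        (acc.1 ++ [PySem.List.pyGetD cs 0 ' '],
         acc.2.1 ++ [PySem.List.pyGetD cs i ' '],
         acc.2.2 ++ [PySem.List.pyGetD cs 0 ' ']))
      ([], [], [])
  String.mk (res.1 ++ res.2.1 ++ res.2.2)

-- ===== PORT B =====
-- Literal port of Source B: block = cadena[:1] * len(cadena); block + cadena + block.
def convertir_slogan_alt (cadena : String) (numero : Int) : String :=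
  let cs := cadena.toList
  let block := (List.replicate cs.length (PySem.List.slice cs none (some 1))).flatten
  String.mk (block ++ cs ++ block)

-- ===== PRECONDITION & SPEC =====
def Spec_convertir_slogan (cadena : String) (numero : Int) (out : String) : Prop := out = convertir_slogan_alt cadena numero
instance (cadena : String) (numero : Int) (out : String) : Decidable (Spec_convertir_slogan cadena numero out) := by unfold Spec_convertir_slogan; infer_instance

-- ===== CLAIM (what is proved, stated in full; the proofs are below) =====
def Claim_equal_convertir_slogan : Prop := ∀ (cadena : String) (numero : Int), Dom_convertir_slogan cadena numero → Spec_convertir_slogan cadena numero (convertir_slogan cadena numero)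

-- ===== LEMMAS AND PROOFS =====

-- The loop over range(0,n) turns the three accumulators into replicate/take/replicate.
lemma convertir_loop (cs : List Char) (n : Nat) (hn : n ≤ cs.length) :
    (PySem.List.pyRange 0 (n : Int) 1).foldl
      (fun (acc : List Char × List Char × List Char) i =>
        (acc.1 ++ [PySem.List.pyGetD cs 0 ' '],
         acc.2.1 ++ [PySem.List.pyGetD cs i ' '],
         acc.2.2 ++ [PySem.List.pyGetD cs 0 ' ']))
      ([], [], [])
    = (List.replicate n (PySem.List.pyGetD cs 0 ' '),
       cs.take n,
       List.replicate n (PySem.List.pyGetD cs 0 ' ')) := by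
  induction n with
  | zero => simp
  | succ m ih =>
    have hm : m ≤ cs.length := Nat.le_of_succ_le hn
    have hsplit : PySem.List.pyRange 0 ((m + 1 : Nat) : Int) 1
        = PySem.List.pyRange 0 (m : Int) 1 ++ [(m : Int)] := by
      push_cast
      exact PySem.List.pyRange_one_succ_right (by positivity)
    rw [hsplit, List.foldl_append, ih hm]
    have hlt : m < cs.length := hn
    have hget : PySem.List.pyGetD cs (m : Int) ' ' = cs[m] := by
      rw [PySem.List.pyGetD_natCast]
      simp [List.getD, hlt]
    rw [List.take_succ, List.getElem?_eq_getElem hlt]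
    simp [hget, List.replicate_succ']

lemma flatten_replicate_take_one (cs : List Char) (n : Nat) (h : cs ≠ []) :
    (List.replicate n (cs.take 1)).flatten = List.replicate n (PySem.List.pyGetD cs 0 ' ') := by
  obtain ⟨c, t, rfl⟩ := List.exists_cons_of_ne_nil h
  induction n with
  | zero => simp
  | succ m ih =>
    simp only [List.replicate_succ, List.flatten_cons, ih]
    simp [PySem.List.pyGetD_zero_cons]

-- ===== VERDICT (by name: the statement is the Claim_ definition above) =====
theorem convertir_slogan_spec : Claim_equal_convertir_slogan := by
  intro cadena numero _
  unfold Spec_convertir_slogan convertir_slogan convertir_slogan_alt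
  simp only
  rw [convertir_loop cadena.toList cadena.toList.length le_rfl]
  rcases h : cadena.toList with _ | ⟨c, t⟩
  · simp
  · rw [show PySem.List.slice (c :: t) none (some 1) = (c :: t).take 1 from
        PySem.List.slice_to_natCast (c :: t) 1]
    rw [flatten_replicate_take_one (c :: t) (c :: t).length (by simp)]
    simp
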